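-- pv_equiv track=rewrite | github.com/ywy0090/NLP_Deeplearning_course | a1/test.py | distinct_words
-- ===== SOURCE A (Python) =====
-- def distinct_words(corpus):
--     """ Determine a list of distinct words for the corpus.
--         Params:
--             corpus (list of list of strings): corpus of documents
--         Return:
--             corpus_words (list of strings): list of distinct words across the corpus, sorted (using python 'sorted' function)
--             num_corpus_words (integer): number of distinct words across the corpus
--     """
--     corpus_words = []
--     final_set =set()
--     num_corpus_words = -1
--     for s in corpus:
--         final_set.update(s)
--     corpus_words = list(final_set)
--     corpus_words.sort()
--     num_corpus_words = len(corpus_words)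
--     # ------------------
--     # Write your implementation here.
--     return corpus_words, num_corpus_words
-- ===== SOURCE B (Python) =====
-- def distinct_words(corpus):
--     """Alternative: flatten all docs, sort once, dedup by adjacency (no set)."""
--     all_words = []
--     for doc in corpus:
--         all_words.extend(doc)
--     all_words.sort()
--     corpus_words = []
--     for w in all_words:
--         if not corpus_words or corpus_words[-1] != w:
--             corpus_words.append(w)
--     return corpus_words, len(corpus_words)
-- ===== Notes on version B (the rewrite author's own statement) =====
-- stated objective: alternative
-- what changed: B collects no set: it flattens the corpus into one list with duplicates, sorts it once, and removes duplicates in a single adjacency scan over the sorted list.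
import Mathlib
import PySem

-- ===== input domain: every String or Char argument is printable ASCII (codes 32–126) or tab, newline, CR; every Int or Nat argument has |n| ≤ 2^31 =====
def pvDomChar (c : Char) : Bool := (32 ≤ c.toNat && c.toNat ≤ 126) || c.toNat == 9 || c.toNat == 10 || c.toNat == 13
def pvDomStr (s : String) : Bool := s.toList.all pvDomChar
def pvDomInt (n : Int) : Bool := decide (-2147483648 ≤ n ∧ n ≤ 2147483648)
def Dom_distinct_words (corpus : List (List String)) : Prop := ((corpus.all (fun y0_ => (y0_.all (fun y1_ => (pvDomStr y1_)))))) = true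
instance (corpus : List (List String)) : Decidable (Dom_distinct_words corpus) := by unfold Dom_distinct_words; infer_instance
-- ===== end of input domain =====

-- B flattens + sorts everything and dedups adjacent duplicates; A builds a set and sorts it. Equivalent; objective: alternative algorithm.

-- ===== PORT A =====
def distinct_words (corpus : List (List String)) : List String × Int :=
  let final_set : PySem.Set String := corpus.foldl (fun s d => PySem.Set.update s d) PySem.Set.empty
  let corpus_words := PySem.List.sorted final_set (fun x => x) false
  (corpus_words, (corpus_words.length : Int))

-- ===== PORT B =====
def distinct_words_alt (corpus : List (List String)) : List String × Int :=
  let all_words := corpus.foldl (fun acc doc => acc ++ doc) []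
  let sorted_all := PySem.List.sorted all_words (fun x => x) false
  let corpus_words := sorted_all.foldl
    (fun acc w => if acc = [] ∨ acc.getLast? ≠ some w then acc ++ [w] else acc) []
  (corpus_words, (corpus_words.length : Int))

-- ===== PRECONDITION & SPEC =====
def Spec_distinct_words (corpus : List (List String)) (out : List String × Int) : Prop := out = distinct_words_alt corpus
instance (corpus : List (List String)) (out : List String × Int) : Decidable (Spec_distinct_words corpus out) := by unfold Spec_distinct_words; infer_instance

-- ===== CLAIM =====
def Claim_equal_distinct_words : Prop := ∀ (corpus : List (List String)), Dom_distinct_words corpus → Spec_distinct_words corpus (distinct_words corpus)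

-- ===== LEMMAS AND PROOFS =====

-- In a strictly increasing list, a member that bounds every element is the last one.
lemma getLast?_of_max (w : String) : ∀ (acc : List String),
    acc.Pairwise (· < ·) → w ∈ acc → (∀ b ∈ acc, b ≤ w) → acc.getLast? = some w := by
  intro acc
  induction acc with
  | nil => intro _ h; cases h
  | cons a t ih =>
    intro hp hmem hb
    cases t with
    | nil =>
      simp at hmem; simp [hmem]
    | cons b t' =>
      have hp' := (List.pairwise_cons.mp hp)
      rcases List.mem_cons.mp hmem with h | h
      · exfalso
        have hab : a < b := hp'.1 b (List.mem_cons_self)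
        have : b ≤ w := hb b (by simp)
        subst h; exact absurd (lt_of_lt_of_le hab this) (lt_irrefl _)
      · have : (b :: t').getLast? = some w :=
          ih hp'.2 h (fun x hx => hb x (List.mem_cons_of_mem _ hx))
        simpa [List.getLast?_cons_cons] using this

-- Invariant of B's dedup fold over a (≤)-sorted list.
lemma dedup_fold_inv : ∀ (l acc : List String),
    acc.Pairwise (· < ·) → l.Pairwise (· ≤ ·) → (∀ a ∈ acc, ∀ x ∈ l, a ≤ x) →
    (l.foldl (fun acc w => if acc = [] ∨ acc.getLast? ≠ some w then acc ++ [w] else acc) acc).Pairwise (· < ·)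
    ∧ ∀ y, (y ∈ l.foldl (fun acc w => if acc = [] ∨ acc.getLast? ≠ some w then acc ++ [w] else acc) acc ↔ y ∈ acc ∨ y ∈ l) := by
  intro l
  induction l with
  | nil => intro acc h1 _ _; simpa using h1
  | cons w t ih =>
    intro acc h1 h2 h3
    have hwt : ∀ x ∈ t, w ≤ x := (List.pairwise_cons.mp h2).1
    have ht : t.Pairwise (· ≤ ·) := (List.pairwise_cons.mp h2).2
    by_cases hc : acc = [] ∨ acc.getLast? ≠ some w
    · -- append w
      have haw : ∀ a ∈ acc, a < w := by
        intro a ha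
        have hle : a ≤ w := h3 a ha w (by simp)
        rcases lt_or_eq_of_le hle with h | h
        · exact h
        · exfalso
          have hlast : acc.getLast? = some w :=
            getLast?_of_max w acc h1 (h ▸ ha) (fun b hb => h3 b hb w (by simp))
          rcases hc with hc | hc
          · subst hc; cases ha
          · exact hc hlast
      have h1' : (acc ++ [w]).Pairwise (· < ·) := by
        rw [List.pairwise_append]
        exact ⟨h1, by simp, by simpa using haw⟩
      have h3' : ∀ a ∈ acc ++ [w], ∀ x ∈ t, a ≤ x := by
        intro a ha x hx
        rcases List.mem_append.mp ha with h | h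
        · exact h3 a h x (List.mem_cons_of_mem _ hx)
        · simp at h; subst h; exact hwt x hx
      have := ih (acc ++ [w]) h1' ht h3'
      refine ⟨by simpa [hc] using this.1, ?_⟩
      intro y
      have hy := this.2 y
      simp only [List.foldl_cons, if_pos hc]
      rw [hy]
      simp [List.mem_append, or_assoc, or_comm, or_left_comm]
    · -- skip w: w is already the last element of acc
      push Not at hc
      have hwmem : w ∈ acc := List.mem_of_getLast? hc.2
      have h3' : ∀ a ∈ acc, ∀ x ∈ t, a ≤ x := fun a ha x hx => h3 a ha x (List.mem_cons_of_mem _ hx)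
      have := ih acc h1 ht h3'
      have hcond : ¬ (acc = [] ∨ acc.getLast? ≠ some w) := by
        push Not; exact hc
      refine ⟨by simpa [hcond] using this.1, ?_⟩
      intro y
      have hy := this.2 y
      simp only [List.foldl_cons, if_neg hcond]
      rw [hy]
      constructor
      · rintro (h | h)
        · exact Or.inl h
        · exact Or.inr (List.mem_cons_of_mem _ h)
      · rintro (h | h)
        · exact Or.inl h
        · rcases List.mem_cons.mp h with h | h
          · exact Or.inl (h ▸ hwmem)
          · exact Or.inr h

-- flatten with a non-empty accumulator
lemma flat_acc : ∀ (cs : List (List String)) (acc : List String),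
    cs.foldl (fun acc doc => acc ++ doc) acc = acc ++ cs.foldl (fun acc doc => acc ++ doc) [] := by
  intro cs
  induction cs with
  | nil => intro acc; simp
  | cons e es ihe =>
    intro acc
    simp only [List.foldl_cons]
    rw [ihe (acc ++ e), ihe ([] ++ e), List.append_assoc]
    simp

-- the set A builds equals set(flatten), with B's flatten
lemma foldl_update_eq_ofList : ∀ (corpus : List (List String)) (s : PySem.Set String),
    corpus.foldl (fun s d => PySem.Set.update s d) s
      = (corpus.foldl (fun acc doc => acc ++ doc) []).foldl PySem.Set.add s := by
  intro corpus
  induction corpus with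
  | nil => intro s; rfl
  | cons d cs ih =>
    intro s
    simp only [List.foldl_cons]
    rw [ih, flat_acc cs ([] ++ d), List.nil_append, List.foldl_append]
    simp [PySem.Set.update]

-- ===== VERDICT =====
theorem distinct_words_spec : Claim_equal_distinct_words := by
  unfold Claim_equal_distinct_words
  intro corpus _
  unfold Spec_distinct_words distinct_words distinct_words_alt
  simp only []
  set flat := corpus.foldl (fun acc doc => acc ++ doc) [] with hflat
  have hset : corpus.foldl (fun s d => PySem.Set.update s d) PySem.Set.empty
      = PySem.Set.ofList flat := by
    rw [foldl_update_eq_ofList]; rfl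
  have hsortedp : (PySem.List.sorted flat (fun x => x) false).Pairwise (· ≤ ·) := by
    simpa using PySem.List.sorted_pairwise flat (fun x => x)
  have hinv := dedup_fold_inv (PySem.List.sorted flat (fun x => x) false) []
      (by simp) hsortedp (by simp)
  set R := (PySem.List.sorted flat (fun x => x) false).foldl
      (fun acc w => if acc = [] ∨ acc.getLast? ≠ some w then acc ++ [w] else acc) [] with hR
  have hRp : R.Pairwise (· < ·) := hinv.1
  have hRmem : ∀ y, y ∈ R ↔ y ∈ flat := by
    intro y
    rw [hinv.2 y]
    simp [PySem.List.mem_sorted]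
  have hRnodup : R.Nodup := hRp.imp (fun h => ne_of_lt h)
  have hperm : R.Perm (PySem.Set.ofList flat) := by
    rw [List.perm_ext_iff_of_nodup hRnodup (PySem.Set.nodup_ofList flat)]
    intro y
    rw [hRmem y, PySem.Set.mem_ofList]
  have hmain : PySem.List.sorted (PySem.Set.ofList flat) (fun x => x) false = R :=
    PySem.List.sorted_eq_of_perm_of_pairwise_lt _ _ _ hperm hRp
  rw [hset, hmain]
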